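-- pv_equiv track=rewrite | github.com/Truscova/scvd | src/scvd/extract_report.py | _build_description_from_span
-- ===== SOURCE A (Python) =====
-- from typing import Any, Dict, List, Optional, Tuple
--
-- def _build_description_from_span(lines: List[str], start: int, end: int) -> Optional[str]:
--     # Trim leading/trailing blank lines inside the span
--     while start < end and not lines[start].strip():
--         start += 1
--     while end > start and not lines[end - 1].strip():
--         end -= 1
--
--     if start >= end:
--         return None
--
--     desc = "\n".join(lines[start:end]).strip()
--     if desc:
--         desc += "\n"
--     return desc
-- ===== SOURCE B (Python) =====
-- from typing import List, Optional
--
-- def _build_description_from_span(lines: List[str], start: int, end: int) -> Optional[str]: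
--     if start >= end:
--         return None
--     desc = "\n".join(lines[start:end]).strip()
--     return desc + "\n" if desc else None
-- ===== Notes on version B (the rewrite author's own statement) =====
-- stated objective: simpler
-- what changed: Replaces the two index-trimming while loops by a single strip() of the joined span (str.strip removes exactly the blank lines the loops trimmed); Pre_ excludes spans with a negative index or end beyond len(lines), where A raises IndexError or returns a value via Python's per-element negative-index wraparound that slice semantics defensibly need not match.
-- outside the precondition, e.g. on _build_description_from_span(['x', ' '], -1, 1): A returns 'x\n', B returns None
import Mathlib
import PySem

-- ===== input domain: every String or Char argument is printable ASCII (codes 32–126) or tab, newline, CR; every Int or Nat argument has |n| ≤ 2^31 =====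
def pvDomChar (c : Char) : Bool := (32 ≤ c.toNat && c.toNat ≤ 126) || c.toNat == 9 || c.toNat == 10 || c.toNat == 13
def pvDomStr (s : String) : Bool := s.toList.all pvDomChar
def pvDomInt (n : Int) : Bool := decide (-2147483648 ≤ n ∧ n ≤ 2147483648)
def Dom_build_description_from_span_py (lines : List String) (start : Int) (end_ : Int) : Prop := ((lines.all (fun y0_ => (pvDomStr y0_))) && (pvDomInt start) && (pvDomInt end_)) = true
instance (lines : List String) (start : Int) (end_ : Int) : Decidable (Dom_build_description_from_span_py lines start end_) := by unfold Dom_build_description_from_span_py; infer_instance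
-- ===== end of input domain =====

-- B replaces A's two index-trimming while loops by one strip() of the joined span (objective: simpler).

-- ===== PORT A =====
-- 'while start < end and not lines[start].strip(): start += 1'  (none = IndexError)
def pvTrimStart (lines : List String) (start : Int) (end_ : Int) : Option Int :=
  if _h : start < end_ then
    match PySem.List.pyGet? lines start with
    | none => none
    | some s => if PySem.Str.strip s = "" then pvTrimStart lines (start + 1) end_ else some start
  else some start
termination_by (end_ - start).toNat
decreasing_by omega

-- 'while end > start and not lines[end - 1].strip(): end -= 1'  (none = IndexError)
def pvTrimEnd (lines : List String) (start : Int) (end_ : Int) : Option Int :=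
  if _h : end_ > start then
    match PySem.List.pyGet? lines (end_ - 1) with
    | none => none
    | some s => if PySem.Str.strip s = "" then pvTrimEnd lines start (end_ - 1) else some end_
  else some end_
termination_by (end_ - start).toNat
decreasing_by omega

def build_description_from_span_py (lines : List String) (start : Int) (end_ : Int) : Option String :=
  match pvTrimStart lines start end_ with
  | none => none
  | some s' =>
    match pvTrimEnd lines s' end_ with
    | none => none
    | some e' =>
      if s' ≥ e' then none
      else
        let desc := PySem.Str.strip (PySem.Str.join "\n" (PySem.List.slice lines (some s') (some e')))
        if desc ≠ "" then some (String.ofList (desc.toList ++ ['\n'])) else some desc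

-- ===== PORT B =====
def build_description_from_span_py_alt (lines : List String) (start : Int) (end_ : Int) : Option String :=
  if start ≥ end_ then none
  else
    let desc := PySem.Str.strip (PySem.Str.join "\n" (PySem.List.slice lines (some start) (some end_)))
    if desc = "" then none else some (String.ofList (desc.toList ++ ['\n']))

-- ===== PRECONDITION & SPEC =====
-- Pre_ keeps the natural domain: an empty span (start ≥ end_) or in-range nonnegative indices; it excludes
-- inputs where A raises IndexError or, through Python's per-element negative-index wraparound, returns a
-- value that slice semantics defensibly need not match.
def Pre_build_description_from_span_py (lines : List String) (start : Int) (end_ : Int) : Prop :=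
  start ≥ end_ ∨ (0 ≤ start ∧ end_ ≤ lines.length)
instance (lines : List String) (start : Int) (end_ : Int) : Decidable (Pre_build_description_from_span_py lines start end_) := by unfold Pre_build_description_from_span_py; infer_instance

def pvWitness_build_description_from_span_py : List String × Int × Int := (["", "a", " "], 0, 3)

def Spec_build_description_from_span_py (lines : List String) (start : Int) (end_ : Int) (out : Option String) : Prop := out = build_description_from_span_py_alt lines start end_
instance (lines : List String) (start : Int) (end_ : Int) (out : Option String) : Decidable (Spec_build_description_from_span_py lines start end_ out) := by unfold Spec_build_description_from_span_py; infer_instance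

-- ===== CLAIM (what is proved, stated in full; the proofs are below) =====
def Claim_equal_build_description_from_span_py : Prop := ∀ (lines : List String) (start : Int) (end_ : Int), Dom_build_description_from_span_py lines start end_ → Pre_build_description_from_span_py lines start end_ → Spec_build_description_from_span_py lines start end_ (build_description_from_span_py lines start end_)

-- ===== LEMMAS AND PROOFS =====

-- blank line, i.e. Python 'not s.strip()'
def pvBlankStr (s : String) : Bool := PySem.Str.strip s = ""
def pvBlankC (x : List Char) : Bool := PySem.Chars.strip x = []

theorem pv_strip_eq_nil_iff (s : List Char) :
    PySem.Chars.strip s = [] ↔ ∀ c ∈ s, PySem.Chars.isspace c := by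
  simp only [PySem.Chars.strip, PySem.Chars.lstrip, PySem.Chars.rstrip,
    List.reverse_eq_nil_iff, List.dropWhile_eq_nil_iff, List.mem_reverse]
  constructor
  · intro h c hc
    have := List.takeWhile_append_dropWhile (p := PySem.Chars.isspace) (l := s)
    rcases List.mem_append.1 (this ▸ hc) with h1 | h1
    · exact List.mem_takeWhile_imp h1
    · exact h c h1
  · intro h c hc
    exact h c (List.dropWhile_subset _ hc)

theorem pv_strip_space_prefix (ws r : List Char) (h : ∀ c ∈ ws, PySem.Chars.isspace c) :
    PySem.Chars.strip (ws ++ r) = PySem.Chars.strip r := by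
  have : List.dropWhile PySem.Chars.isspace ws = [] := List.dropWhile_eq_nil_iff.2 h
  simp [PySem.Chars.strip, PySem.Chars.lstrip, List.dropWhile_append, this]

theorem pv_strip_space_suffix (r ws : List Char) (h : ∀ c ∈ ws, PySem.Chars.isspace c) :
    PySem.Chars.strip (r ++ ws) = PySem.Chars.strip r := by
  have hws : List.dropWhile PySem.Chars.isspace ws.reverse = [] :=
    List.dropWhile_eq_nil_iff.2 (by simpa using h)
  simp only [PySem.Chars.strip, PySem.Chars.lstrip, List.dropWhile_append]
  by_cases hr : List.dropWhile PySem.Chars.isspace r = []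
  · simp [hr, PySem.Chars.rstrip]
    intro x hx
    exact h x (List.dropWhile_subset _ hx)
  · simp [hr, PySem.Chars.rstrip, List.reverse_append, List.dropWhile_append, hws]

theorem pv_join_cons_cons (x y : List Char) (t : List (List Char)) :
    PySem.Chars.join ['\n'] (x :: y :: t) = x ++ '\n' :: PySem.Chars.join ['\n'] (y :: t) := by
  simp [PySem.Chars.join, List.intercalate, List.intersperse]

theorem pv_join_singleton (x : List Char) : PySem.Chars.join ['\n'] [x] = x := by
  simp [PySem.Chars.join, List.intercalate, List.intersperse]

theorem pv_join_append_singleton (t : List (List Char)) (x : List Char) (ht : t ≠ []) :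
    PySem.Chars.join ['\n'] (t ++ [x]) = PySem.Chars.join ['\n'] t ++ '\n' :: x := by
  induction t with
  | nil => simp at ht
  | cons a t ih =>
    cases t with
    | nil => simp [PySem.Chars.join, List.intercalate, List.intersperse]
    | cons b t' =>
      have h1 : (a :: (b :: t') ++ [x]) = a :: ((b :: t') ++ [x]) := by simp
      rw [h1]
      have h2 : (b :: t') ++ [x] = b :: (t' ++ [x]) := by simp
      rw [h2, pv_join_cons_cons, ← h2, ih (by simp), pv_join_cons_cons]
      simp

theorem pv_blank_all (x : List Char) (h : pvBlankC x = true) : ∀ c ∈ x, PySem.Chars.isspace c :=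
  (pv_strip_eq_nil_iff x).1 (by simpa [pvBlankC] using h)

theorem pv_strip_join_dropWhile (l : List (List Char)) :
    PySem.Chars.strip (PySem.Chars.join ['\n'] (l.dropWhile pvBlankC)) =
      PySem.Chars.strip (PySem.Chars.join ['\n'] l) := by
  induction l with
  | nil => rfl
  | cons x t ih =>
    by_cases hx : pvBlankC x = true
    · rw [List.dropWhile_cons_of_pos hx]
      cases t with
      | nil =>
        simp
        rw [show PySem.Chars.strip [] = [] from rfl]
        exact ((pv_strip_eq_nil_iff x).2 (pv_blank_all x hx)).symm
      | cons y t' =>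
        rw [ih, pv_join_cons_cons]
        have h1 : x ++ '\n' :: PySem.Chars.join ['\n'] (y :: t')
            = (x ++ ['\n']) ++ PySem.Chars.join ['\n'] (y :: t') := by simp
        rw [h1, pv_strip_space_prefix]
        intro c hc
        rcases List.mem_append.1 hc with h1 | h1
        · exact pv_blank_all x hx c h1
        · simp at h1; subst h1; decide
    · rw [List.dropWhile_cons_of_neg hx]

theorem pv_strip_join_rdropWhile (l : List (List Char)) :
    PySem.Chars.strip (PySem.Chars.join ['\n'] (l.rdropWhile pvBlankC)) =
      PySem.Chars.strip (PySem.Chars.join ['\n'] l) := by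
  induction l using List.reverseRecOn with
  | nil => rfl
  | append_singleton t x ih =>
    by_cases hx : pvBlankC x = true
    · rw [List.rdropWhile_concat_pos _ _ _ hx]
      cases t with
      | nil =>
        simp [List.rdropWhile_nil]
        rw [show PySem.Chars.strip [] = [] from rfl]
        exact ((pv_strip_eq_nil_iff x).2 (pv_blank_all x hx)).symm
      | cons y t' =>
        rw [ih, pv_join_append_singleton _ _ (by simp), pv_strip_space_suffix]
        intro c hc
        rcases List.mem_cons.1 hc with h1 | h1
        · subst h1; decide
        · exact pv_blank_all x hx c h1
    · rw [List.rdropWhile_concat_neg _ _ _ hx]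

theorem pv_slice_cons (lines : List String) (a b : Int) (h0 : 0 ≤ a) (h1 : a < b)
    (ha : a.toNat < lines.length) :
    PySem.List.slice lines (some a) (some b) = lines[a.toNat] :: PySem.List.slice lines (some (a + 1)) (some b) := by
  rw [PySem.List.slice_toNat _ h0 (by omega), PySem.List.slice_toNat _ (by omega) (by omega),
    List.drop_eq_getElem_cons ha]
  have h4 : (a + 1).toNat = a.toNat + 1 := by omega
  rw [h4]
  have : b.toNat - a.toNat = (b.toNat - (a.toNat + 1)) + 1 := by omega
  rw [this, List.take_succ_cons]

theorem pv_slice_concat (lines : List String) (a b : Int) (h0 : 0 ≤ a) (h1 : a < b) (h2 : b ≤ lines.length) :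
    PySem.List.slice lines (some a) (some b) =
      PySem.List.slice lines (some a) (some (b - 1)) ++ [lines[(b - 1).toNat]'(by omega)] := by
  rw [PySem.List.slice_toNat _ h0 (by omega), PySem.List.slice_toNat _ h0 (by omega)]
  have : b.toNat - a.toNat = ((b - 1).toNat - a.toNat) + 1 := by omega
  rw [this, List.take_add_one]
  congr 1
  rw [List.getElem?_drop, show a.toNat + ((b - 1).toNat - a.toNat) = (b - 1).toNat by omega,
    List.getElem?_eq_getElem (by omega)]
  simp

theorem pvTrimStart_spec (lines : List String) (end_ : Int) (n : Nat) : ∀ (start : Int),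
    (end_ - start).toNat = n → 0 ≤ start → start ≤ end_ → end_ ≤ lines.length →
    ∃ s', pvTrimStart lines start end_ = some s' ∧ start ≤ s' ∧ s' ≤ end_ ∧
      PySem.List.slice lines (some s') (some end_) =
        (PySem.List.slice lines (some start) (some end_)).dropWhile pvBlankStr := by
  induction n with
  | zero =>
    intro start hn h0 h1 h2
    have he : start = end_ := by omega
    refine ⟨start, ?_, le_refl _, h1, ?_⟩
    · rw [pvTrimStart]; simp [show ¬ start < end_ by omega]
    · subst he
      rw [PySem.List.slice_toNat _ h0 h0]
      simp
  | succ n ih =>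
    intro start hn h0 h1 h2
    have hlt : start < end_ := by omega
    have ha : start.toNat < lines.length := by omega
    have hget : PySem.List.pyGet? lines start = some lines[start.toNat] :=
      PySem.List.pyGet?_eq_some_getElem _ h0 (by omega)
    rw [pvTrimStart]
    simp only [hlt, dite_true, hget]
    by_cases hb : PySem.Str.strip lines[start.toNat] = ""
    · simp only [hb, if_true]
      obtain ⟨s', hrec, hle1, hle2, hsl⟩ := ih (start + 1) (by omega) (by omega) (by omega) h2
      refine ⟨s', hrec, by omega, hle2, ?_⟩
      rw [hsl, pv_slice_cons lines start end_ h0 hlt ha,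
        List.dropWhile_cons_of_pos (by simp [pvBlankStr, hb])]
    · simp only [hb, if_false]
      refine ⟨start, rfl, le_refl _, by omega, ?_⟩
      rw [pv_slice_cons lines start end_ h0 hlt ha,
        List.dropWhile_cons_of_neg (by simp [pvBlankStr, hb])]

theorem pvTrimEnd_spec (lines : List String) (start : Int) (n : Nat) : ∀ (end_ : Int),
    (end_ - start).toNat = n → 0 ≤ start → start ≤ end_ → end_ ≤ lines.length →
    ∃ e', pvTrimEnd lines start end_ = some e' ∧ start ≤ e' ∧ e' ≤ end_ ∧
      PySem.List.slice lines (some start) (some e') =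
        (PySem.List.slice lines (some start) (some end_)).rdropWhile pvBlankStr := by
  induction n with
  | zero =>
    intro end_ hn h0 h1 h2
    have he : start = end_ := by omega
    refine ⟨end_, ?_, h1, le_refl _, ?_⟩
    · rw [pvTrimEnd]; simp [show ¬ end_ > start by omega]
    · subst he
      rw [PySem.List.slice_toNat _ h0 h0]
      simp [List.rdropWhile_nil]
  | succ n ih =>
    intro end_ hn h0 h1 h2
    have hlt : start < end_ := by omega
    have hb1 : (end_ - 1).toNat < lines.length := by omega
    have hx : lines[(end_ - 1).toNat]'hb1 = lines[end_.toNat - 1]'(by omega) := by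
      congr 1
      omega
    have hget : PySem.List.pyGet? lines (end_ - 1) = some (lines[end_.toNat - 1]'(by omega)) := by
      rw [PySem.List.pyGet?_eq_some_getElem _ (by omega) (by omega), hx]
    rw [pvTrimEnd]
    simp only [hlt, dite_true, hget]
    by_cases hb : PySem.Str.strip (lines[end_.toNat - 1]'(by omega)) = ""
    · simp only [hb, if_true]
      obtain ⟨e', hrec, hle1, hle2, hsl⟩ := ih (end_ - 1) (by omega) h0 (by omega) (by omega)
      refine ⟨e', hrec, hle1, by omega, ?_⟩
      rw [hsl, pv_slice_concat lines start end_ h0 hlt h2,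
        List.rdropWhile_concat_pos _ _ _ (by simp [pvBlankStr, hb])]
    · simp only [hb, if_false]
      refine ⟨end_, rfl, by omega, le_refl _, ?_⟩
      rw [pv_slice_concat lines start end_ h0 hlt h2,
        List.rdropWhile_concat_neg _ _ _ (by simp [pvBlankStr, hb])]

theorem pv_blank_comp (s : String) : pvBlankC s.toList = pvBlankStr s := by
  simp [pvBlankC, pvBlankStr, ← String.toList_eq_nil_iff, PySem.Str.toList_strip]

theorem pv_rdropWhile_map {α β : Type} (p : β → Bool) (f : α → β) (l : List α) :
    List.rdropWhile p (List.map f l) = List.map f (List.rdropWhile (p ∘ f) l) := by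
  simp [List.rdropWhile, ← List.map_reverse, List.dropWhile_map]

-- the stripped joined span is unchanged by trimming blank lines at either end
theorem pv_strip_join_trim (w : List String) :
    PySem.Chars.strip (PySem.Chars.join ['\n']
        (((w.dropWhile pvBlankStr).rdropWhile pvBlankStr).map String.toList)) =
      PySem.Chars.strip (PySem.Chars.join ['\n'] (w.map String.toList)) := by
  have hcomp : ∀ (l : List String), l.dropWhile pvBlankStr = l.dropWhile (pvBlankC ∘ String.toList) := by
    intro l
    congr 1
    funext s
    simp [pv_blank_comp s]
  have hcomp' : ∀ (l : List String), l.rdropWhile pvBlankStr = l.rdropWhile (pvBlankC ∘ String.toList) := by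
    intro l
    congr 1
    funext s
    simp [pv_blank_comp s]
  rw [hcomp, hcomp', ← pv_rdropWhile_map pvBlankC String.toList, ← List.dropWhile_map,
    pv_strip_join_rdropWhile, pv_strip_join_dropWhile]

-- if the trimmed span is nonempty, the stripped join is nonempty
theorem pv_strip_join_ne_nil (w : List String)
    (hne : (w.dropWhile pvBlankStr).rdropWhile pvBlankStr ≠ []) :
    PySem.Chars.strip (PySem.Chars.join ['\n']
        (((w.dropWhile pvBlankStr).rdropWhile pvBlankStr).map String.toList)) ≠ [] := by
  obtain ⟨h, rest, hw⟩ := List.exists_cons_of_ne_nil hne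
  obtain ⟨t, hcat⟩ := List.rdropWhile_prefix pvBlankStr (w.dropWhile pvBlankStr)
  have hwdeq : List.dropWhile pvBlankStr w = h :: (rest ++ t) := by
    rw [← hcat, hw]; simp
  have hne' : List.dropWhile pvBlankStr w ≠ [] := by rw [hwdeq]; simp
  have h1 := List.head_dropWhile_not pvBlankStr hne'
  have h2 : (List.dropWhile pvBlankStr w).head hne' = h := by
    have h3 := List.head?_eq_some_head hne'
    have h4 : (List.dropWhile pvBlankStr w).head? = some h := by rw [hwdeq]; rfl
    exact Option.some.inj (h3.symm.trans h4)
  rw [h2] at h1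
  intro habs
  have hall := (pv_strip_eq_nil_iff _).1 habs
  have hhx : ∀ c ∈ h.toList, PySem.Chars.isspace c := by
    intro c hc
    apply hall
    rw [hw]
    cases rest with
    | nil => simpa [pv_join_singleton] using hc
    | cons y t' =>
      rw [List.map_cons, List.map_cons, pv_join_cons_cons]
      exact List.mem_append.2 (Or.inl hc)
  have hb : pvBlankC h.toList = true := by
    simp only [pvBlankC, decide_eq_true_eq]
    exact (pv_strip_eq_nil_iff _).2 hhx
  rw [pv_blank_comp, h1] at hb
  exact Bool.false_ne_true hb

-- ===== VERDICT (by name: the statement is the Claim_ definition above) =====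
theorem build_description_from_span_py_spec : Claim_equal_build_description_from_span_py := by
  intro lines start end_ _hdom hpre
  unfold Spec_build_description_from_span_py
  by_cases hlt : start < end_
  · have hb : 0 ≤ start ∧ end_ ≤ (lines.length : Int) := by
      rcases hpre with h | h
      · omega
      · exact h
    obtain ⟨h0, h2⟩ := hb
    obtain ⟨s', hs, hs1, hs2, hsl⟩ :=
      pvTrimStart_spec lines end_ (end_ - start).toNat start rfl h0 (le_of_lt hlt) h2
    obtain ⟨e', he, he1, he2, hel⟩ :=
      pvTrimEnd_spec lines s' (end_ - s').toNat end_ rfl (by omega) hs2 h2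
    rw [hsl] at hel
    simp only [build_description_from_span_py, build_description_from_span_py_alt, hs, he]
    simp only [show ¬ start ≥ end_ by omega, if_false]
    set w := PySem.List.slice lines (some start) (some end_) with hw
    -- slice s' e' is the doubly-trimmed span
    have hkey : PySem.List.slice lines (some s') (some e') =
        (w.dropWhile pvBlankStr).rdropWhile pvBlankStr := hel
    have hlen : (PySem.List.slice lines (some s') (some e')).length = e'.toNat - s'.toNat := by
      rw [PySem.List.slice_toNat _ (by omega) (by omega)]
      simp
      omega
    have htoListA : (PySem.Str.strip (PySem.Str.join "\n" (PySem.List.slice lines (some s') (some e')))).toList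
        = PySem.Chars.strip (PySem.Chars.join ['\n']
            ((((w.dropWhile pvBlankStr).rdropWhile pvBlankStr)).map String.toList)) := by
      rw [PySem.Str.toList_strip, PySem.Str.toList_join, hkey]
      rfl
    have htoListB : (PySem.Str.strip (PySem.Str.join "\n" w)).toList
        = PySem.Chars.strip (PySem.Chars.join ['\n'] (w.map String.toList)) := by
      rw [PySem.Str.toList_strip, PySem.Str.toList_join]
      rfl
    by_cases hge : s' ≥ e'
    · -- trimmed span is empty: B's stripped join is empty too
      have hnil : PySem.List.slice lines (some s') (some e') = [] := by
        have : (PySem.List.slice lines (some s') (some e')).length = 0 := by omega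
        exact List.eq_nil_of_length_eq_zero this
      have hBnil : PySem.Str.strip (PySem.Str.join "\n" w) = "" := by
        rw [← String.toList_eq_nil_iff, htoListB, ← pv_strip_join_trim, ← hkey, hnil]
        rfl
      simp [hge, hBnil]
    · -- trimmed span nonempty: both produce the same nonempty description
      have hne : (w.dropWhile pvBlankStr).rdropWhile pvBlankStr ≠ [] := by
        rw [← hkey]
        intro h
        rw [h] at hlen
        simp at hlen
        omega
      have heqdesc : PySem.Str.strip (PySem.Str.join "\n" (PySem.List.slice lines (some s') (some e')))
          = PySem.Str.strip (PySem.Str.join "\n" w) := by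
        apply String.toList_inj.mp
        rw [htoListA, htoListB, pv_strip_join_trim]
      have hAne : PySem.Str.strip (PySem.Str.join "\n" (PySem.List.slice lines (some s') (some e'))) ≠ "" := by
        intro hcontr
        have hl : (PySem.Str.strip (PySem.Str.join "\n" (PySem.List.slice lines (some s') (some e')))).toList = [] := by
          rw [hcontr]; rfl
        rw [htoListA] at hl
        exact pv_strip_join_ne_nil w hne hl
      simp only [hge, if_false]
      rw [← heqdesc]
      simp [hAne]
  · have hA1 : pvTrimStart lines start end_ = some start := by
      rw [pvTrimStart]; simp [hlt]
    have hA2 : pvTrimEnd lines start end_ = some end_ := by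
      rw [pvTrimEnd]; simp [show ¬ end_ > start by omega]
    simp only [build_description_from_span_py, build_description_from_span_py_alt, hA1, hA2]
    simp [show start ≥ end_ by omega]
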